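-- pv_equiv track=rewrite | github.com/zhanghx0905/master-archive | 5500-ALGO/HW4/run.py | countmin_sketch
-- ===== SOURCE A (Python) =====
-- def countmin_sketch(nums: list[int]):
--     ''' range [0, 9] '''
--     h0 = lambda x: (2 * x + 3) % 5
--     h1 = lambda x: (3 * x + 1) % 5
--     C = [
--         [0, 0, 0, 0, 0],
--         [0, 0, 0, 0, 0]
--     ]
--     for num in nums:
--         C[0][h0(num)] += 1
--         C[1][h1(num)] += 1
--     freq = [0] * 10
--     for i in range(10):
--         freq[i] = min(C[0][h0(i)], C[1][h1(i)])
--     return C, freq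
-- ===== SOURCE B (Python) =====
-- def countmin_sketch(nums: list[int]):
--     ''' range [0, 9] '''
--     h0 = lambda x: (2 * x + 3) % 5
--     h1 = lambda x: (3 * x + 1) % 5
--     row0 = [sum(1 for n in nums if h0(n) == j) for j in range(5)]
--     row1 = [sum(1 for n in nums if h1(n) == j) for j in range(5)]
--     freq = [min(row0[h0(i)], row1[h1(i)]) for i in range(10)]
--     return [row0, row1], freq
-- ===== Notes on version B (the rewrite author's own statement) =====
-- stated objective: alternative
-- what changed: B replaces A's single pass of per-element in-place increments on a mutable 2x5 table by building each row with per-bucket counting comprehensions (one count query per bucket), keeping the same estimation loop.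
import Mathlib
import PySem

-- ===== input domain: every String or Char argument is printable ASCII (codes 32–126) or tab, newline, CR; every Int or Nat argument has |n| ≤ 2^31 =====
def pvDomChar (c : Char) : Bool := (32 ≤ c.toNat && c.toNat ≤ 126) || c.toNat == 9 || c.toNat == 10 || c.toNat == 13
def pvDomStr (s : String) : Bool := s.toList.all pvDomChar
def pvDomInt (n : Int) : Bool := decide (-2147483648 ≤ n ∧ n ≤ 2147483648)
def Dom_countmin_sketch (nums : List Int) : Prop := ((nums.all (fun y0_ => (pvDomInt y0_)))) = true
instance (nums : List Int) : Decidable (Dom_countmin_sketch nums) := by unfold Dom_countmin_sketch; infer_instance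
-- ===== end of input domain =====

-- B replaces A's per-element in-place increments on the 2×5 table by per-bucket counting
-- comprehensions (one count query per bucket); objective: alternative decomposition, not faster.

-- the two hash functions, shared by both Pythons (Python '%' with positive divisor 5)
def pvH0 (x : Int) : Int := PySem.Int.mod (2 * x + 3) 5
def pvH1 (x : Int) : Int := PySem.Int.mod (3 * x + 1) 5

-- ===== PORT A =====
-- 'C[r][k] += 1'; k = h(num) is always in [0,5), so .toNat is exact here (never negative)
def pvBump (l : List Int) (k : Nat) : List Int := l.set k (l.getD k 0 + 1)

def countmin_sketch (nums : List Int) : List (List Int) × List Int :=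
  let C := nums.foldl
    (fun (C : List Int × List Int) num =>
      (pvBump C.1 (pvH0 num).toNat, pvBump C.2 (pvH1 num).toNat))
    ([0, 0, 0, 0, 0], [0, 0, 0, 0, 0])
  let freq := (PySem.List.pyRange 0 10 1).map (fun i =>
      min (PySem.List.pyGetD C.1 (pvH0 i) 0) (PySem.List.pyGetD C.2 (pvH1 i) 0))
  ([C.1, C.2], freq)

-- ===== PORT B =====
-- '[sum(1 for n in nums if h(n) == j) for j in range(5)]'
def pvRow (h : Int → Int) (nums : List Int) : List Int :=
  (PySem.List.pyRange 0 5 1).map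
    (fun j => nums.foldl (fun acc n => if h n = j then acc + 1 else acc) 0)

def countmin_sketch_alt (nums : List Int) : List (List Int) × List Int :=
  let row0 := pvRow pvH0 nums
  let row1 := pvRow pvH1 nums
  let freq := (PySem.List.pyRange 0 10 1).map (fun i =>
      min (PySem.List.pyGetD row0 (pvH0 i) 0) (PySem.List.pyGetD row1 (pvH1 i) 0))
  ([row0, row1], freq)

-- ===== PRECONDITION & SPEC =====
def Spec_countmin_sketch (nums : List Int) (out : List (List Int) × List Int) : Prop := out = countmin_sketch_alt nums
instance (nums : List Int) (out : List (List Int) × List Int) : Decidable (Spec_countmin_sketch nums out) := by unfold Spec_countmin_sketch; infer_instance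

-- ===== CLAIM (what is proved, stated in full; the proofs are below) =====
def Claim_equal_countmin_sketch : Prop := ∀ (nums : List Int), Dom_countmin_sketch nums → Spec_countmin_sketch nums (countmin_sketch nums)

-- ===== LEMMAS AND PROOFS =====
lemma pvBump_length (l : List Int) (k : Nat) : (pvBump l k).length = l.length := by
  simp [pvBump]

lemma pvBump_getD (l : List Int) (k j : Nat) (hk : k < l.length) :
    (pvBump l k).getD j 0 = l.getD j 0 + (if j = k then 1 else 0) := by
  by_cases hj : j < l.length
  · by_cases hjk : j = k
    · subst hjk
      simp [pvBump, List.getD_eq_getElem?_getD, hj]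
    · simp [pvBump, List.getD_eq_getElem?_getD, List.getElem?_set_ne, Ne.symm hjk, hjk]
  · have hjk : j ≠ k := by omega
    simp [pvBump, List.getD_eq_getElem?_getD, List.getElem?_set_ne, Ne.symm hjk, hjk,
      List.getElem?_eq_none (by simpa using Nat.le_of_not_lt hj)]

lemma pvH_bounds (a b x : Int) : 0 ≤ PySem.Int.mod (a * x + b) 5 ∧ PySem.Int.mod (a * x + b) 5 < 5 :=
  ⟨PySem.Int.mod_nonneg _ (by norm_num), PySem.Int.mod_lt _ (by norm_num)⟩

lemma row_fold (h : Int → Int) (hb : ∀ n, 0 ≤ h n ∧ h n < 5) :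
    ∀ (nums : List Int) (s : List Int), s.length = 5 →
      nums.foldl (fun s n => pvBump s (h n).toNat) s
        = (List.range 5).map (fun j => s.getD j 0 + (nums.countP (fun n => h n = (j : Int)) : Int)) := by
  intro nums
  induction nums with
  | nil =>
    intro s hs
    apply List.ext_getElem
    · simp [hs]
    · intro i h1 h2
      simp only [List.foldl_nil] at h1
      simp [List.getD_eq_getElem?_getD, List.getElem?_eq_getElem h1]
  | cons n ns ih =>
    intro s hs
    have hk : (h n).toNat < s.length := by
      have := hb n; omega
    rw [List.foldl_cons, ih _ (by rw [pvBump_length]; exact hs)]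
    apply List.map_congr_left
    intro j hj
    rw [pvBump_getD _ _ _ hk, List.countP_cons]
    have hiff : (j = (h n).toNat) ↔ (h n = (j : Int)) := by
      have := hb n; omega
    by_cases hc : h n = (j : Int)
    · rw [if_pos (hiff.mpr hc)]
      simp only [hc, decide_true, if_pos]
      push_cast
      ring
    · rw [if_neg (fun hh => hc (hiff.mp hh))]
      simp only [hc, decide_false]
      rw [if_neg (by simp)]
      push_cast
      ring

lemma row_eq (h : Int → Int) (hb : ∀ n, 0 ≤ h n ∧ h n < 5) (nums : List Int) :
    nums.foldl (fun s n => pvBump s (h n).toNat) [0, 0, 0, 0, 0] = pvRow h nums := by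
  rw [row_fold h hb nums [0, 0, 0, 0, 0] rfl]
  unfold pvRow
  rw [(show PySem.List.pyRange 0 5 1 = [0, 1, 2, 3, 4] by decide)]
  simp only [List.range_succ, List.range_zero, List.map, List.nil_append, List.cons_append,
    List.getD, List.getElem?_cons_zero, List.getElem?_cons_succ, Option.getD_some,
    PySem.List.foldl_ite_add_one]
  norm_num

-- ===== VERDICT (by name: the statement is the Claim_ definition above) =====
theorem countmin_sketch_spec : Claim_equal_countmin_sketch := by
  intro nums _
  show countmin_sketch nums = countmin_sketch_alt nums
  unfold countmin_sketch countmin_sketch_alt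
  rw [PySem.List.foldl_prod_mk (f := fun s0 n => pvBump s0 (pvH0 n).toNat)
      (g := fun s1 n => pvBump s1 (pvH1 n).toNat),
    row_eq pvH0 (fun n => pvH_bounds 2 3 n) nums,
    row_eq pvH1 (fun n => pvH_bounds 3 1 n) nums]
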